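-- pv_equiv track=rewrite | github.com/Liri3d/PortraitSemObj | find_same_edges.py | find_all_same_edges
-- ===== SOURCE A (Python) =====
-- def find_one_same_edges(state, transitions_dict):
--     # Проверяем, существует ли состояние в словаре
--     if state not in transitions_dict:
--         return f"State '{state}' not found in the transitions dictionary."
--
--     # Извлекаем рёбра для заданного состояния
--     target_edges = transitions_dict[state]
--
--     same_edge_states = []
--
--     # Сравниваем с другими состояниями
--     for other_state, edges in transitions_dict.items():
--         if other_state != state and edges == target_edges:
--             same_edge_states.append(other_state)
--
--     return same_edge_states
--
-- def find_all_same_edges(transitions_dict):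
--     result = []  # Список для хранения наборов с одинаковыми рёбрами
--     seen = set()  # Множество для отслеживания уже добавленных наборов
--
--     for state in transitions_dict.keys():
--         same_edges = find_one_same_edges(state, transitions_dict)
--         if same_edges and state not in seen:
--             # Создаем множество состояний, включая текущее состояние и найденные одинаковые рёбра
--             edge_set = {state}
--             edge_set.update(same_edges)
--             edge_set = tuple(sorted(edge_set))  # Сортируем и преобразуем в кортеж
--             if edge_set not in seen:  # Проверяем, были ли уже добавлены такие состояния
--                 result.append(edge_set)
--                 seen.update(edge_set)  # Помечаем все состояния в наборе как просмотренные
--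
--     return result
-- ===== SOURCE B (Python) =====
-- def find_all_same_edges(transitions_dict):
--     groups = {}
--     for state, edges in transitions_dict.items():
--         groups.setdefault(tuple(edges), []).append(state)
--     return [tuple(sorted(g)) for g in groups.values() if len(g) > 1]
-- ===== Notes on version B (the rewrite author's own statement) =====
-- stated objective: faster
-- what changed: Replaces A's per-state rescans of the whole dict (find_one_same_edges for every state plus a seen-set) by a single group-by pass: each state is appended to a dict bucket keyed by its edge tuple, and the size>1 buckets are emitted sorted in first-occurrence order.
import Mathlib
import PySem

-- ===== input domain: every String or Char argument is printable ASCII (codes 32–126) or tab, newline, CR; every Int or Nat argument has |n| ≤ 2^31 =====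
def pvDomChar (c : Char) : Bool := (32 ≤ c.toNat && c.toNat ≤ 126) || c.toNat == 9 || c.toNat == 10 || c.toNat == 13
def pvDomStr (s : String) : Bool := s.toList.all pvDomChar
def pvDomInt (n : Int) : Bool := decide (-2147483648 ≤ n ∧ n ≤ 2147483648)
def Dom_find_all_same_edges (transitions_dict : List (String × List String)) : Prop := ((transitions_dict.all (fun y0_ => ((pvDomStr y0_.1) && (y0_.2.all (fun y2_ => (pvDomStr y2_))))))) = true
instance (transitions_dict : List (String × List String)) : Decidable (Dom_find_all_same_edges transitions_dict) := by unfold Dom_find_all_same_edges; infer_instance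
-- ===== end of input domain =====

-- B replaces A's per-state rescan of the whole dict by a single group-by pass over the items
-- (bucket each state under its edge list, emit the size>1 buckets sorted); objective: faster.

-- ===== PORT A =====
-- The Python parameter is a dict; the association-list argument is turned into one by PySem.Dict.ofList.
def find_one_same_edges (state : String) (transitions_dict : PySem.Dict String (List String)) : List String :=
  if transitions_dict.contains state = false then []
  else
    let target_edges := transitions_dict.getD state []
    transitions_dict.items.foldl
      (fun same_edge_states p =>
        if p.1 ≠ state ∧ p.2 = target_edges then same_edge_states ++ [p.1] else same_edge_states)
      []

def pvStepA (d : PySem.Dict String (List String))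
    (acc : List (List String) × PySem.Set String) (state : String) :
    List (List String) × PySem.Set String :=
  let same_edges := find_one_same_edges state d
  if same_edges ≠ [] ∧ state ∉ acc.2 then
    let edge_set := PySem.List.sorted (PySem.Set.update (PySem.Set.ofList [state]) same_edges) (fun x => x) false
    (acc.1 ++ [edge_set], PySem.Set.update acc.2 edge_set)
  else acc

def find_all_same_edges (transitions_dict : List (String × List String)) : List (List String) :=
  let d := PySem.Dict.ofList transitions_dict
  (d.keys.foldl (pvStepA d) ([], PySem.Set.empty)).1

-- ===== PORT B =====
def find_all_same_edges_alt (transitions_dict : List (String × List String)) : List (List String) :=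
  let d := PySem.Dict.ofList transitions_dict
  let groups := d.items.foldl
    (fun g p => g.modify p.2 [] (fun states => states ++ [p.1])) PySem.Dict.empty
  (groups.values.filter (fun g => 1 < g.length)).map (fun g => PySem.List.sorted g (fun x => x) false)

-- ===== PRECONDITION & SPEC =====
def Spec_find_all_same_edges (transitions_dict : List (String × List String)) (out : List (List String)) : Prop := out = find_all_same_edges_alt transitions_dict
instance (transitions_dict : List (String × List String)) (out : List (List String)) : Decidable (Spec_find_all_same_edges transitions_dict out) := by unfold Spec_find_all_same_edges; infer_instance

-- ===== CLAIM (what is proved, stated in full; the proofs are below) =====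
def Claim_equal_find_all_same_edges : Prop := ∀ (transitions_dict : List (String × List String)), Dom_find_all_same_edges transitions_dict → Spec_find_all_same_edges transitions_dict (find_all_same_edges transitions_dict)

-- ===== LEMMAS AND PROOFS =====

theorem pv_getD_of_mem {L : List (String × List String)} {k : String} {v : List String}
    (hnd : (L.map (fun p => p.1)).Nodup) (hv : (k, v) ∈ L) :
    (PySem.Dict.mk L).getD k [] = v :=
  PySem.Dict.getD_of_mem_items (d := ⟨L⟩) (by simpa using hv) (by simpa using hnd) []

theorem pv_contains_mk {L : List (String × List String)} {k : String} (h : k ∈ L.map (fun p => p.1)) :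
    (PySem.Dict.mk L).contains k = true := by
  rw [PySem.Dict.contains_iff_mem_keys]
  simpa using h

theorem pv_find_one_eq {L : List (String × List String)} {k : String} {v : List String}
    (hnd : (L.map (fun p => p.1)).Nodup) (hv : (k, v) ∈ L) :
    find_one_same_edges k (PySem.Dict.mk L)
      = (L.filter (fun p => decide (p.1 ≠ k ∧ p.2 = v))).map (fun p => p.1) := by
  have hc := pv_contains_mk (L := L) (k := k) (by exact List.mem_map.mpr ⟨(k, v), hv, rfl⟩)
  rw [find_one_same_edges, if_neg (by simp [hc])]
  rw [pv_getD_of_mem hnd hv]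
  exact PySem.List.foldl_append_ite _ _ _ _

theorem pv_find_one_filter' {L : List (String × List String)} {e v : List String} {k : String}
    (hnd : (L.map (fun p => p.1)).Nodup) (hv : (k, v) ∈ L) (hve : v ≠ e) :
    find_one_same_edges k (PySem.Dict.mk (L.filter (fun p => p.2 != e)))
      = find_one_same_edges k (PySem.Dict.mk L) := by
  have hv' : (k, v) ∈ L.filter (fun p => p.2 != e) := by
    rw [List.mem_filter]; exact ⟨hv, by simp [hve]⟩
  have hnd' : ((L.filter (fun p => p.2 != e)).map (fun p => p.1)).Nodup :=
    ((List.filter_sublist).map _).nodup hnd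
  rw [pv_find_one_eq hnd' hv', pv_find_one_eq hnd hv, List.filter_filter]
  congr 1
  apply List.filter_congr
  intro p hp
  by_cases h : p.1 ≠ k ∧ p.2 = v
  · simp [h, hve]
  · simp [h]

theorem pv_foldl_shift (d : PySem.Dict String (List String)) (ks : List String)
    (r : List (List String)) (s : PySem.Set String) :
    ks.foldl (pvStepA d) (r, s)
      = (r ++ (ks.foldl (pvStepA d) ([], s)).1, (ks.foldl (pvStepA d) ([], s)).2) := by
  induction ks generalizing r s with
  | nil => simp
  | cons k ks ih =>
    simp only [List.foldl_cons]
    by_cases h : find_one_same_edges k d ≠ [] ∧ k ∉ s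
    · have h1 : pvStepA d (r, s) k
          = (r ++ [PySem.List.sorted (PySem.Set.update (PySem.Set.ofList [k]) (find_one_same_edges k d)) (fun x => x) false],
             PySem.Set.update s (PySem.List.sorted (PySem.Set.update (PySem.Set.ofList [k]) (find_one_same_edges k d)) (fun x => x) false)) := by
        simp only [pvStepA]; rw [if_pos h]
      have h2 : pvStepA d ([], s) k
          = ([PySem.List.sorted (PySem.Set.update (PySem.Set.ofList [k]) (find_one_same_edges k d)) (fun x => x) false],
             PySem.Set.update s (PySem.List.sorted (PySem.Set.update (PySem.Set.ofList [k]) (find_one_same_edges k d)) (fun x => x) false)) := by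
        simp only [pvStepA]; rw [if_pos h]; rfl
      rw [h1, h2, ih, ih (r := [_])]
      simp
    · have h1 : pvStepA d (r, s) k = (r, s) := by simp only [pvStepA]; rw [if_neg h]
      have h2 : pvStepA d ([], s) k = ([], s) := by simp only [pvStepA]; rw [if_neg h]
      rw [h1, h2, ih]

theorem pv_mem_update {α : Type} [BEq α] [LawfulBEq α] {s : PySem.Set α} {l : List α} {x : α} :
    x ∈ PySem.Set.update s l ↔ x ∈ s ∨ x ∈ l := by
  induction l generalizing s with
  | nil => simp [PySem.Set.update]
  | cons y ys ih =>
    simp only [PySem.Set.update, List.foldl_cons] at *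
    rw [ih]
    simp [PySem.Set.mem_add]
    tauto

theorem pv_add_of_mem {α : Type} [BEq α] [LawfulBEq α] {s : PySem.Set α} {x : α} (hx : x ∈ s) :
    PySem.Set.add s x = s := by
  simp [PySem.Set.add, PySem.Set.contains, hx]

theorem pv_add_of_not_mem {α : Type} [BEq α] [LawfulBEq α] {s : PySem.Set α} {x : α} (hx : x ∉ s) :
    PySem.Set.add s x = s ++ [x] := by
  simp [PySem.Set.add, PySem.Set.contains, hx]

theorem pv_update_disjoint {α : Type} [BEq α] [LawfulBEq α] (l : List α) (s : PySem.Set α)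
    (hn : l.Nodup) (hd : ∀ x ∈ l, x ∉ s) :
    PySem.Set.update s l = s ++ l := by
  induction l generalizing s with
  | nil => simp [PySem.Set.update]
  | cons y ys ih =>
    simp only [PySem.Set.update, List.foldl_cons] at *
    rw [pv_add_of_not_mem (hd y (by simp))]
    rw [ih _ (hn.of_cons)]
    · simp
    · intro x hx
      simp only [List.mem_append, List.mem_singleton]
      rintro (h | rfl)
      · exact hd x (by simp [hx]) h
      · exact (List.nodup_cons.mp hn).1 hx

theorem pv_update_filter_mem {α : Type} [BEq α] [LawfulBEq α] (xs : List α) (s : PySem.Set α) (x : α) (hx : x ∈ s) :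
    PySem.Set.update s xs = PySem.Set.update s (xs.filter (fun y => y != x)) := by
  induction xs generalizing s with
  | nil => rfl
  | cons y ys ih =>
    by_cases hyx : y = x
    · subst hyx
      simp only [PySem.Set.update, List.foldl_cons, List.filter_cons] at *
      rw [if_neg (by simp), pv_add_of_mem hx]
      exact ih s hx
    · simp only [PySem.Set.update, List.foldl_cons, List.filter_cons] at *
      rw [if_pos (by simp [bne, hyx])]
      simp only [List.foldl_cons]
      exact ih _ (by rw [PySem.Set.mem_add]; left; exact hx)

theorem pv_update_cons_notmem {α : Type} [BEq α] [LawfulBEq α] (zs : List α) (x : α) (s : PySem.Set α)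
    (hx : x ∉ zs) : PySem.Set.update (x :: s) zs = x :: PySem.Set.update s zs := by
  induction zs generalizing s with
  | nil => rfl
  | cons y ys ih =>
    have hyx : y ≠ x := fun h => hx (by simp [h])
    simp only [PySem.Set.update, List.foldl_cons] at *
    have hadd : PySem.Set.add (x :: s) y = x :: PySem.Set.add s y := by
      by_cases hy : y ∈ s
      · rw [pv_add_of_mem (by simp [hy]), pv_add_of_mem hy]
      · rw [pv_add_of_not_mem (by simp [hy, hyx] : y ∉ x :: s), pv_add_of_not_mem hy]
        simp
    rw [hadd]
    exact ih _ (fun h => hx (by simp [h]))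

theorem pv_ofList_cons {α : Type} [BEq α] [LawfulBEq α] (x : α) (xs : List α) :
    PySem.Set.ofList (x :: xs) = x :: PySem.Set.ofList (xs.filter (fun y => y != x)) := by
  have h1 : PySem.Set.ofList (x :: xs) = PySem.Set.update [x] xs := by
    simp [PySem.Set.ofList_eq_foldl, PySem.Set.update, PySem.Set.add, PySem.Set.contains]
  have h2 : PySem.Set.ofList (xs.filter (fun y => y != x)) = PySem.Set.update [] (xs.filter (fun y => y != x)) := by
    simp [PySem.Set.ofList_eq_foldl, PySem.Set.update]
  rw [h1, h2, pv_update_filter_mem xs [x] x (by simp)]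
  exact pv_update_cons_notmem _ _ _ (by simp)

theorem pv_keys_filter {L R : List (String × List String)} {e : List String}
    (hsub : ∀ p ∈ R, (PySem.Dict.mk L).getD p.1 [] = p.2) :
    (R.map (fun p => p.1)).filter (fun k => (PySem.Dict.mk L).getD k [] != e)
      = (R.filter (fun p => p.2 != e)).map (fun p => p.1) := by
  rw [List.filter_map]
  congr 1
  apply List.filter_congr
  intro p hp
  simp [Function.comp, hsub p hp]

theorem pv_skipA (ks : List String) (L : List (String × List String)) (e : List String)
    (s1 s2 : PySem.Set String)
    (hnd : (L.map (fun p => p.1)).Nodup)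
    (hks : ∀ k ∈ ks, k ∈ L.map (fun p => p.1))
    (hinv : ∀ k ∈ ks, (k ∈ s1 ↔ (k ∈ s2 ∨ (PySem.Dict.mk L).getD k [] = e))) :
    (ks.foldl (pvStepA (PySem.Dict.mk L)) ([], s1)).1
      = ((ks.filter (fun k => (PySem.Dict.mk L).getD k [] != e)).foldl
          (pvStepA (PySem.Dict.mk (L.filter (fun p => p.2 != e)))) ([], s2)).1 := by
  induction ks generalizing s1 s2 with
  | nil => simp
  | cons k ks ih =>
    obtain ⟨⟨k', v⟩, hpair, hk'⟩ := List.mem_map.mp (hks k (by simp))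
    simp only at hk'
    subst hk'
    have hgd : (PySem.Dict.mk L).getD k' [] = v := pv_getD_of_mem hnd hpair
    by_cases hve : v = e
    · -- k' is in class e: it is in s1, A skips it; the filter drops it on the right
      have hk_s1 : k' ∈ s1 := (hinv k' (by simp)).mpr (Or.inr (by rw [hgd, hve]))
      have hstep : pvStepA (PySem.Dict.mk L) ([], s1) k' = ([], s1) := by
        simp only [pvStepA]; rw [if_neg (by simp [hk_s1])]
      rw [List.foldl_cons, hstep, List.filter_cons_of_neg (by simp [hgd, hve])]
      exact ih s1 s2 (fun x hx => hks x (by simp [hx])) (fun x hx => hinv x (by simp [hx]))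
    · -- k' is outside class e: both sides process it identically
      have hfo := pv_find_one_filter' hnd hpair hve
      have hmem : k' ∈ s1 ↔ k' ∈ s2 := by
        rw [hinv k' (by simp), hgd]
        simp [hve]
      rw [List.foldl_cons, List.filter_cons_of_pos (by simp [hgd, hve]), List.foldl_cons]
      by_cases hg : find_one_same_edges k' (PySem.Dict.mk L) ≠ [] ∧ k' ∉ s1
      · have hg2 : find_one_same_edges k' (PySem.Dict.mk (L.filter (fun p => p.2 != e))) ≠ [] ∧ k' ∉ s2 := by
          rw [hfo]; exact ⟨hg.1, fun h => hg.2 (hmem.mpr h)⟩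
        set g := PySem.List.sorted (PySem.Set.update (PySem.Set.ofList [k']) (find_one_same_edges k' (PySem.Dict.mk L))) (fun x => x) false with hgdef
        have h1 : pvStepA (PySem.Dict.mk L) ([], s1) k' = ([g], PySem.Set.update s1 g) := by
          simp only [pvStepA]; rw [if_pos hg]; rfl
        have h2 : pvStepA (PySem.Dict.mk (L.filter (fun p => p.2 != e))) ([], s2) k'
            = ([g], PySem.Set.update s2 g) := by
          simp only [pvStepA]; rw [if_pos hg2, hfo]; rfl
        rw [h1, h2, pv_foldl_shift _ _ [g], pv_foldl_shift _ _ [g]]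
        have := ih (PySem.Set.update s1 g) (PySem.Set.update s2 g)
          (fun x hx => hks x (by simp [hx]))
          (fun x hx => by
            rw [pv_mem_update, pv_mem_update, hinv x (by simp [hx])]
            tauto)
        simp only [this]
      · have hg2 : ¬ (find_one_same_edges k' (PySem.Dict.mk (L.filter (fun p => p.2 != e))) ≠ [] ∧ k' ∉ s2) := by
          rw [hfo]
          intro h
          exact hg ⟨h.1, fun hm => h.2 (hmem.mp hm)⟩
        have h1 : pvStepA (PySem.Dict.mk L) ([], s1) k' = ([], s1) := by
          simp only [pvStepA]; rw [if_neg hg]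
        have h2 : pvStepA (PySem.Dict.mk (L.filter (fun p => p.2 != e))) ([], s2) k' = ([], s2) := by
          simp only [pvStepA]; rw [if_neg hg2]
        rw [h1, h2]
        exact ih s1 s2 (fun x hx => hks x (by simp [hx])) (fun x hx => hinv x (by simp [hx]))

def pvF : List (String × List String) → List (List String)
  | [] => []
  | (st, e) :: R =>
      (if R.filter (fun p => p.2 == e) = [] then ([] : List (List String))
       else [PySem.List.sorted (st :: (R.filter (fun p => p.2 == e)).map (fun p => p.1)) (fun x => x) false])
      ++ pvF (R.filter (fun p => p.2 != e))
termination_by L => L.length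
decreasing_by
  simp only [List.length_cons, List.length_unattach, Nat.lt_succ_iff]
  calc _ ≤ R.attach.length := List.length_filter_le _ _
    _ = R.length := List.length_attach ..

theorem pvF_cons (st : String) (e : List String) (R : List (String × List String)) :
    pvF ((st, e) :: R)
      = (if R.filter (fun p => p.2 == e) = [] then ([] : List (List String))
         else [PySem.List.sorted (st :: (R.filter (fun p => p.2 == e)).map (fun p => p.1)) (fun x => x) false])
        ++ pvF (R.filter (fun p => p.2 != e)) := by
  rw [pvF]

theorem pv_ofList_singleton {α : Type} [BEq α] [LawfulBEq α] (x : α) : PySem.Set.ofList [x] = [x] := by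
  simp [PySem.Set.ofList_eq_foldl, PySem.Set.add, PySem.Set.contains]

theorem pv_decide_eq_beq (a b : List String) : decide (a = b) = (a == b) := by
  rw [Bool.eq_iff_iff]; simp

theorem pv_A_eq_F (L : List (String × List String)) (hnd : (L.map (fun p => p.1)).Nodup) :
    ((L.map (fun p => p.1)).foldl (pvStepA (PySem.Dict.mk L)) ([], PySem.Set.empty)).1 = pvF L := by
  induction L using pvF.induct with
  | case1 => simp [pvF]
  | case2 st e R ih =>
    simp only [List.unattach_filter, List.unattach_attach] at ih
    have hst : st ∉ R.map (fun p => p.1) := (List.nodup_cons.mp (by simpa using hnd)).1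
    have hndR : (R.map (fun p => p.1)).Nodup := (List.nodup_cons.mp (by simpa using hnd)).2
    have hsame : find_one_same_edges st (PySem.Dict.mk ((st, e) :: R))
        = (R.filter (fun p => p.2 == e)).map (fun p => p.1) := by
      rw [pv_find_one_eq hnd (by simp : (st, e) ∈ (st, e) :: R)]
      rw [List.filter_cons_of_neg (by simp)]
      congr 1
      apply List.filter_congr
      intro p hp
      have hps : p.1 ≠ st := fun h => hst (h ▸ List.mem_map.mpr ⟨p, hp, rfl⟩)
      simp [hps, pv_decide_eq_beq]
    have hgetR : ∀ p ∈ R, (PySem.Dict.mk ((st, e) :: R)).getD p.1 [] = p.2 := by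
      intro p hp
      exact pv_getD_of_mem hnd (by simp [hp])
    have hLfilter : ((st, e) :: R).filter (fun p => p.2 != e) = R.filter (fun p => p.2 != e) := by
      rw [List.filter_cons_of_neg (by simp)]
    have hnd' : ((R.filter (fun p => p.2 != e)).map (fun p => p.1)).Nodup :=
      ((List.filter_sublist).map _).nodup hndR
    rw [List.map_cons, List.foldl_cons, pvF_cons]
    by_cases hR : R.filter (fun p => p.2 == e) = []
    · -- the class of edge e is {st} alone: nothing is emitted for st
      have hsame0 : find_one_same_edges st (PySem.Dict.mk ((st, e) :: R)) = [] := by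
        rw [hsame, hR]; rfl
      have hstep : pvStepA (PySem.Dict.mk ((st, e) :: R)) ([], PySem.Set.empty) st
          = ([], PySem.Set.empty) := by
        simp only [pvStepA]; rw [if_neg (by simp [hsame0])]
      have hnoe : ∀ k ∈ R.map (fun p => p.1), ¬ (PySem.Dict.mk ((st, e) :: R)).getD k [] = e := by
        intro k hk hke
        obtain ⟨p, hp, rfl⟩ := List.mem_map.mp hk
        have hpe : p.2 = e := by rw [← hgetR p hp, hke]
        have : p ∈ R.filter (fun q => q.2 == e) := List.mem_filter.mpr ⟨hp, by simp [hpe]⟩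
        simp [hR] at this
      rw [hstep]
      rw [pv_skipA (R.map (fun p => p.1)) ((st, e) :: R) e PySem.Set.empty PySem.Set.empty hnd
        (fun k hk => by simp [hk])
        (fun k hk => by
          constructor
          · intro h; exact absurd h (by simp [PySem.Set.empty])
          · rintro (h | h)
            · exact absurd h (by simp [PySem.Set.empty])
            · exact absurd h (hnoe k hk))]
      rw [pv_keys_filter hgetR, hLfilter, ih hnd', if_pos hR, List.nil_append]
    · -- st is the first state of a size>1 class: the sorted class is emitted
      set sameR := (R.filter (fun p => p.2 == e)).map (fun p => p.1) with hsameR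
      have hsameNodup : sameR.Nodup := ((List.filter_sublist).map _).nodup hndR
      have hsubR : ∀ x ∈ sameR, x ∈ R.map (fun p => p.1) :=
        fun x hx => ((List.filter_sublist).map _).mem hx
      have hstn : st ∉ sameR := fun h => hst (hsubR st h)
      have hupd : PySem.Set.update (PySem.Set.ofList [st]) sameR = st :: sameR := by
        rw [pv_ofList_singleton, pv_update_disjoint sameR [st] hsameNodup
          (fun x hx => by simp; rintro rfl; exact hstn hx)]
        rfl
      set g := PySem.List.sorted (st :: sameR) (fun x => x) false with hgdef
      have hgs : find_one_same_edges st (PySem.Dict.mk ((st, e) :: R)) ≠ [] := by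
        rw [hsame]
        intro h
        rw [hsameR] at h
        exact hR (List.map_eq_nil_iff.mp h)
      have hstep : pvStepA (PySem.Dict.mk ((st, e) :: R)) ([], PySem.Set.empty) st
          = ([g], PySem.Set.update PySem.Set.empty g) := by
        simp only [pvStepA]
        rw [if_pos ⟨hgs, by simp [PySem.Set.empty]⟩, hsame, hupd]
        rfl
      have hmemg : ∀ x, x ∈ g ↔ x = st ∨ x ∈ sameR := by
        intro x
        rw [hgdef, (PySem.List.sorted_perm _ _ _).mem_iff]
        simp
      rw [hstep, pv_foldl_shift]
      rw [pv_skipA (R.map (fun p => p.1)) ((st, e) :: R) e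
        (PySem.Set.update PySem.Set.empty g) PySem.Set.empty hnd
        (fun k hk => by simp [hk])
        (fun k hk => by
          rw [pv_mem_update]
          constructor
          · rintro (h | h)
            · exact absurd h (by simp [PySem.Set.empty])
            · right
              rcases (hmemg k).mp h with rfl | hk'
              · exact absurd hk hst
              · obtain ⟨p, hp, rfl⟩ := List.mem_map.mp hk'
                have hpe : p.2 = e := by simpa using (List.mem_filter.mp hp).2
                rw [hgetR p (List.mem_filter.mp hp).1, hpe]
          · rintro (h | h)
            · exact absurd h (by simp [PySem.Set.empty])
            · right
              obtain ⟨p, hp, rfl⟩ := List.mem_map.mp hk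
              rw [hgetR p hp] at h
              rw [hmemg]
              exact Or.inr (List.mem_map.mpr ⟨p, List.mem_filter.mpr ⟨hp, by simp [h]⟩, rfl⟩))]
      rw [pv_keys_filter hgetR, hLfilter, ih hnd', if_neg hR]

def pvClassOf (L : List (String × List String)) (e : List String) : List String :=
  (L.filter (fun p => p.2 == e)).map (fun p => p.1)

def pvG (L : List (String × List String)) : List (List String) :=
  ((PySem.Set.ofList (L.map (fun p => p.2))).filter (fun e => 1 < (pvClassOf L e).length)).map
    (fun e => PySem.List.sorted (pvClassOf L e) (fun x => x) false)

theorem pv_A_eq (td : List (String × List String)) :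
    find_all_same_edges td = pvF (PySem.Dict.ofList td).items := by
  have hnd : (((PySem.Dict.ofList td).items).map (fun p => p.1)).Nodup := by
    simpa [PySem.Dict.keys] using PySem.Dict.nodup_keys_ofList (ν := List String) td
  have h := pv_A_eq_F (PySem.Dict.ofList td).items hnd
  simpa [find_all_same_edges, PySem.Dict.keys] using h

theorem pv_B_eq_G (td : List (String × List String)) :
    find_all_same_edges_alt td = pvG (PySem.Dict.ofList td).items := by
  set L := (PySem.Dict.ofList td).items with hLdef
  set groups := L.foldl (fun g p => g.modify p.2 [] (fun states => states ++ [p.1])) PySem.Dict.empty with hgroups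
  have hB : find_all_same_edges_alt td
      = (groups.values.filter (fun g => 1 < g.length)).map (fun g => PySem.List.sorted g (fun x => x) false) := rfl
  rw [hB]
  have hkeys : groups.keys = PySem.Set.ofList (L.map (fun p => p.2)) := by
    rw [hgroups, PySem.Dict.keys_foldl_modify_key L (fun p => p.2) []
      (fun _ p => fun states => states ++ [p.1]) PySem.Dict.empty]
    simp [PySem.Set.update, PySem.Set.ofList_eq_foldl]
  have hnodup : groups.keys.Nodup := by
    rw [hgroups]
    exact PySem.Dict.nodup_keys_foldl_modify_key L (fun p => p.2) []
      (fun _ p => fun states => states ++ [p.1]) PySem.Dict.empty (by simp)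
  have hgetD : ∀ c, groups.getD c [] = pvClassOf L c := by
    intro c
    have hswap : groups = (L.map Prod.swap).foldl
        (fun g q => g.modify q.1 [] (fun states => states ++ [q.2])) PySem.Dict.empty := by
      rw [List.foldl_map]
      rfl
    rw [hswap, PySem.Dict.getD_foldl_modify_append]
    simp only [PySem.Dict.getD_empty, List.nil_append, List.filter_map, List.map_map]
    rfl
  have hvals : groups.values = groups.keys.map (fun k => groups.getD k []) :=
    PySem.Dict.values_eq_map_keys groups hnodup []
  rw [hvals]
  have hfun : (fun k => groups.getD k []) = fun k => pvClassOf L k := funext hgetD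
  rw [hfun, List.filter_map, List.map_map, hkeys]
  rfl

theorem pv_G_eq_F (L : List (String × List String)) : pvG L = pvF L := by
  induction L using pvF.induct with
  | case1 => simp [pvG, pvF, PySem.Set.ofList_eq_foldl]
  | case2 st e R ih =>
    simp only [List.unattach_filter, List.unattach_attach] at ih
    have hclsL : pvClassOf ((st, e) :: R) e = st :: pvClassOf R e := by
      simp only [pvClassOf]
      rw [List.filter_cons_of_pos (by exact beq_self_eq_true e), List.map_cons]
    have hT : (R.map (fun p => p.2)).filter (fun y => y != e)
        = (R.filter (fun p => p.2 != e)).map (fun p => p.2) := by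
      rw [List.filter_map]
      rfl
    have hcls' : ∀ e', e' ≠ e →
        pvClassOf ((st, e) :: R) e' = pvClassOf (R.filter (fun p => p.2 != e)) e' := by
      intro e' he'
      have h1 : pvClassOf ((st, e) :: R) e' = pvClassOf R e' := by
        simp only [pvClassOf]
        rw [List.filter_cons_of_neg (by simp only [beq_iff_eq]; exact fun h => he' h.symm)]
      have h2 : (R.filter (fun p => p.2 != e)).filter (fun p => p.2 == e')
          = R.filter (fun p => p.2 == e') := by
        rw [List.filter_filter]
        apply List.filter_congr
        intro p _
        by_cases hp : p.2 = e'
        · simp [hp, he']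
        · simp [hp]
      rw [h1]
      simp only [pvClassOf]
      rw [h2]
    have hmemT : ∀ e', e' ∈ PySem.Set.ofList ((R.map (fun p => p.2)).filter (fun y => y != e)) → e' ≠ e := by
      intro e' he'
      rw [PySem.Set.mem_ofList] at he'
      simpa using (List.mem_filter.mp he').2
    have hhead : (decide (1 < (pvClassOf ((st, e) :: R) e).length))
        = !(decide (R.filter (fun p => p.2 == e) = [])) := by
      rw [hclsL]
      by_cases h : R.filter (fun p => p.2 == e) = []
      · simp [pvClassOf, h]
      · have hne : pvClassOf R e ≠ [] := by
          simp only [pvClassOf, ne_eq, List.map_eq_nil_iff]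
          exact h
        have hpos : 0 < (pvClassOf R e).length := List.length_pos_iff.mpr hne
        simp only [List.length_cons, h, decide_false, Bool.not_false]
        simpa using by omega
    have hXfun : ∀ e' ∈ PySem.Set.ofList ((R.map (fun p => p.2)).filter (fun y => y != e)),
        pvClassOf ((st, e) :: R) e' = pvClassOf (R.filter (fun p => p.2 != e)) e' :=
      fun e' he' => hcls' e' (hmemT e' he')
    have hXf : (PySem.Set.ofList ((R.map (fun p => p.2)).filter (fun y => y != e))).filter
          (fun e' => decide (1 < (pvClassOf ((st, e) :: R) e').length))
        = (PySem.Set.ofList ((R.map (fun p => p.2)).filter (fun y => y != e))).filter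
          (fun e' => decide (1 < (pvClassOf (R.filter (fun p => p.2 != e)) e').length)) :=
      List.filter_congr (fun e' he' => by rw [hXfun e' he'])
    have htail :
        (((PySem.Set.ofList ((R.map (fun p => p.2)).filter (fun y => y != e))).filter
          (fun e' => decide (1 < (pvClassOf ((st, e) :: R) e').length))).map
            (fun e' => PySem.List.sorted (pvClassOf ((st, e) :: R) e') (fun x => x) false))
        = pvG (R.filter (fun p => p.2 != e)) := by
      rw [hXf]
      refine (List.map_congr_left (g := fun e' => PySem.List.sorted (pvClassOf (R.filter (fun p => p.2 != e)) e') (fun x => x) false) ?_).trans ?_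
      · intro e' he'
        exact congrArg (fun c => PySem.List.sorted c (fun x => x) false)
          (hXfun e' (List.mem_of_mem_filter he'))
      · rw [hT]
        rfl
    have hmain : pvG ((st, e) :: R)
        = (if R.filter (fun p => p.2 == e) = [] then ([] : List (List String))
           else [PySem.List.sorted (st :: (R.filter (fun p => p.2 == e)).map (fun p => p.1)) (fun x => x) false])
          ++ pvG (R.filter (fun p => p.2 != e)) := by
      rw [pvG, List.map_cons, pv_ofList_cons, List.filter_cons, hhead]
      by_cases h : R.filter (fun p => p.2 == e) = []
      · simp only [h, decide_true, Bool.not_true, Bool.false_eq_true, if_false]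
        exact htail
      · simp only [h, decide_false, Bool.not_false, if_true, List.map_cons]
        rw [htail, hclsL]
        rfl
    rw [hmain, pvF_cons, ih]

-- ===== VERDICT (by name: the statement is the Claim_ definition above) =====
theorem find_all_same_edges_spec : Claim_equal_find_all_same_edges := by
  intro td _
  show find_all_same_edges td = find_all_same_edges_alt td
  rw [pv_A_eq, pv_B_eq_G, pv_G_eq_F]
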